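-- pv_equiv track=rewrite | github.com/Revi1337/BaekJoon-Coding-Test | 백준/Silver/5555. 반지/반지.py | solution
-- ===== SOURCE A (Python) =====
-- def solution(t, N, rings):
--     answer = 0
--     tlength = len(t)
--     for ring in rings:
--         length = len(ring)
--         for start in range(length):
--             end = (start + tlength) % length
--             if end > start:
--                 string = ring[start : end]
--             else:
--                 string = ring[start:] + ring[:end]
--             if string == t:
--                 answer += 1
--                 break
--     return answer
-- ===== SOURCE B (Python) =====
-- def solution(t, N, rings):
--     tl = len(t)
--     return sum(1 for ring in rings if 0 < tl <= len(ring) and t in ring + ring)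
-- ===== Notes on version B (the rewrite author's own statement) =====
-- stated objective: faster
-- what changed: Replaces the per-start rotation-building loop with a single substring test 't in ring+ring' (guarded by 0 < len(t) <= len(ring)), turning the O(L^2) per-ring scan into one linear search.
import Mathlib
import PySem

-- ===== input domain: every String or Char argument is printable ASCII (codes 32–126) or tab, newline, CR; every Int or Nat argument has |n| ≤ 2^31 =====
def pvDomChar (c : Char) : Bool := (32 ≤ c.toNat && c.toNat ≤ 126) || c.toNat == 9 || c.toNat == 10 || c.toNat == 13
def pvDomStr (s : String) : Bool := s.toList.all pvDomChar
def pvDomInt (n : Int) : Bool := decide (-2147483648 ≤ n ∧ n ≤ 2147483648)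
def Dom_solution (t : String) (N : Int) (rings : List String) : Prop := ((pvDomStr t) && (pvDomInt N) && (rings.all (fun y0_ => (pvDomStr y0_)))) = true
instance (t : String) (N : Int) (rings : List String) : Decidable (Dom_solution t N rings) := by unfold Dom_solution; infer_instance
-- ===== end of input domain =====

-- B replaces A's per-start rotation-building inner loop with one substring test on ring+ring (objective: faster).

-- ===== PORT A =====
-- the wrap-around window ring[start:end] / ring[start:]+ring[:end] of A's inner loop
def solWindow (r : List Char) (tl : Nat) (s : Int) : List Char :=
  let e := PySem.Int.mod (s + (tl : Int)) ((r.length : Int))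
  if e > s then PySem.List.slice r (some s) (some e)
  else PySem.List.slice r (some s) none ++ PySem.List.slice r none (some e)

-- A's inner 'for start in range(length): … break' as structural recursion over the range list
def solLoop (t r : List Char) : List Int → Bool
  | [] => false
  | s :: rest => if solWindow r t.length s = t then true else solLoop t r rest

def solution (t : String) (N : Int) (rings : List String) : Int :=
  rings.foldl (fun answer ring =>
    if solLoop t.toList ring.toList (PySem.List.pyRange 0 ((ring.toList.length : Int)) 1)
    then answer + 1 else answer) 0

-- ===== PORT B =====
def solution_alt (t : String) (N : Int) (rings : List String) : Int :=
  let tl : Int := PySem.Str.len t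
  rings.foldl (fun acc ring =>
    acc + (if 0 < tl ∧ tl ≤ PySem.Str.len ring ∧ PySem.Str.isIn t (ring ++ ring) = true then 1 else 0)) 0

-- ===== PRECONDITION & SPEC =====
def Spec_solution (t : String) (N : Int) (rings : List String) (out : Int) : Prop := out = solution_alt t N rings
instance (t : String) (N : Int) (rings : List String) (out : Int) : Decidable (Spec_solution t N rings out) := by unfold Spec_solution; infer_instance

-- ===== CLAIM (what is proved, stated in full; the proofs are below) =====
def Claim_equal_solution : Prop := ∀ (t : String) (N : Int) (rings : List String), Dom_solution t N rings → Spec_solution t N rings (solution t N rings)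

-- ===== LEMMAS AND PROOFS =====

-- the window, when the pattern fits on the ring, is a plain window of ring++ring
lemma solWindow_eq_take (r : List Char) (tl n : Nat) (hn : n < r.length)
    (h0 : 0 < tl) (hL : tl ≤ r.length) :
    solWindow r tl (n : Int) = ((r ++ r).drop n).take tl := by
  have hdrop : (r ++ r).drop n = r.drop n ++ r := by
    rw [List.drop_append, Nat.sub_eq_zero_of_le (le_of_lt hn), List.drop_zero]
  have hcast : ((n : Int) + (tl : Int)) = (((n + tl : Nat)) : Int) := (Nat.cast_add _ _).symm
  simp only [solWindow, hcast, PySem.Int.mod_natCast]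
  by_cases hc : n + tl < r.length
  · rw [Nat.mod_eq_of_lt hc]
    rw [if_pos (by exact_mod_cast Nat.lt_add_of_pos_right h0)]
    rw [PySem.List.slice_natCast, hdrop, List.take_append]
    have h1 : tl - (r.drop n).length = 0 := by simp only [List.length_drop]; omega
    rw [h1, List.take_zero, List.append_nil]
    congr 1
    omega
  · have heq : (n + tl) % r.length = n + tl - r.length := by
      rw [Nat.mod_eq_sub_mod (by omega), Nat.mod_eq_of_lt (by omega)]
    rw [heq]
    rw [if_neg (by omega)]
    rw [PySem.List.slice_from_natCast, PySem.List.slice_to_natCast, hdrop, List.take_append]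
    have htk : List.take tl (List.drop n r) = List.drop n r :=
      List.take_of_length_le (by simp only [List.length_drop]; omega)
    have h2 : tl - (List.drop n r).length = n + tl - r.length := by
      simp only [List.length_drop]; omega
    rw [htk, h2]

-- a successful comparison forces 0 < len(t) ≤ len(ring)
lemma solWindow_len (r t : List Char) (n : Nat) (hn : n < r.length)
    (h : solWindow r t.length (n : Int) = t) :
    0 < t.length ∧ t.length ≤ r.length := by
  have hL0 : 0 < r.length := by omega
  have hcast : ((n : Int) + (t.length : Int)) = (((n + t.length : Nat)) : Int) := (Nat.cast_add _ _).symm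
  have heN : (n + t.length) % r.length < r.length := Nat.mod_lt _ hL0
  have hlen := congrArg List.length h
  simp only [solWindow, hcast, PySem.Int.mod_natCast] at hlen
  split_ifs at hlen with hcond
  · have hne : n < (n + t.length) % r.length := by exact_mod_cast hcond
    rw [PySem.List.slice_natCast] at hlen
    simp at hlen
    omega
  · have hne : (n + t.length) % r.length ≤ n := by
      have : ¬ ((n : Int) < (((n + t.length) % r.length : Nat) : Int)) := hcond
      omega
    rw [PySem.List.slice_from_natCast, PySem.List.slice_to_natCast] at hlen
    simp at hlen
    omega

-- A's inner loop is an any-scan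
lemma solLoop_eq_any (t r : List Char) (l : List Int) :
    solLoop t r l = l.any (fun s => solWindow r t.length s = t) := by
  induction l with
  | nil => rfl
  | cons x xs ih =>
      simp only [solLoop, List.any_cons, ← ih]
      split_ifs with h <;> simp [h]

-- per-ring equivalence of A's scan with the circular-substring condition
lemma ring_iff (t r : List Char) :
    (solLoop t r (PySem.List.pyRange 0 ((r.length : Int)) 1) = true) ↔
    (0 < t.length ∧ t.length ≤ r.length ∧ t <:+: (r ++ r)) := by
  rw [solLoop_eq_any, List.any_eq_true]
  constructor
  · rintro ⟨s, hs, hmatch⟩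
    rw [PySem.List.mem_pyRange_one] at hs
    obtain ⟨hs0, hsL⟩ := hs
    obtain ⟨n, rfl⟩ : ∃ m : Nat, s = (m : Int) := ⟨s.toNat, (Int.toNat_of_nonneg hs0).symm⟩
    have hn : n < r.length := by exact_mod_cast hsL
    have hmatch' : solWindow r t.length (n : Int) = t := by simpa using hmatch
    obtain ⟨h0, hL⟩ := solWindow_len r t n hn hmatch'
    refine ⟨h0, hL, ?_⟩
    rw [solWindow_eq_take r t.length n hn h0 hL] at hmatch'
    rw [List.infix_iff_prefix_suffix]
    exact ⟨(r ++ r).drop n, hmatch' ▸ List.take_prefix _ _, List.drop_suffix _ _⟩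
  · rintro ⟨h0, hL, hinf⟩
    rw [List.infix_iff_prefix_suffix] at hinf
    obtain ⟨u, hpre, hsuf⟩ := hinf
    rw [List.suffix_iff_eq_drop] at hsuf
    have hpre' : t <+: (r ++ r).drop ((r ++ r).length - u.length) := hsuf ▸ hpre
    set p := (r ++ r).length - u.length with hp
    have hplen : p + t.length ≤ 2 * r.length := by
      have h1 := hpre'.length_le
      simp at h1
      simp only [List.length_append] at hp
      omega
    have ht : t = ((r ++ r).drop p).take t.length := List.prefix_iff_eq_take.mp hpre'
    by_cases hpc : p < r.length
    · refine ⟨(p : Int), ?_, ?_⟩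
      · rw [PySem.List.mem_pyRange_one]
        constructor
        · exact_mod_cast Nat.zero_le p
        · exact_mod_cast hpc
      · simp only [decide_eq_true_eq]
        rw [solWindow_eq_take r t.length p hpc h0 hL]
        exact ht.symm
    · set q := p - r.length with hq
      have hqL : q < r.length := by omega
      refine ⟨(q : Int), ?_, ?_⟩
      · rw [PySem.List.mem_pyRange_one]
        constructor
        · exact_mod_cast Nat.zero_le q
        · exact_mod_cast hqL
      · simp only [decide_eq_true_eq]
        rw [solWindow_eq_take r t.length q hqL h0 hL]
        have hdp : (r ++ r).drop p = r.drop q := by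
          rw [List.drop_append, List.drop_eq_nil_of_le (by omega), List.nil_append, hq]
        have hdn : (r ++ r).drop q = r.drop q ++ r := by
          rw [List.drop_append, Nat.sub_eq_zero_of_le (le_of_lt hqL), List.drop_zero]
        rw [hdn, List.take_append]
        have h1 : t.length - (List.drop q r).length = 0 := by
          simp only [List.length_drop]; omega
        rw [h1, List.take_zero, List.append_nil]
        rw [hdp] at ht
        exact ht.symm

-- the B-side condition, restated on character lists
lemma cond_iff (t ring : String) :
    (0 < PySem.Str.len t ∧ PySem.Str.len t ≤ PySem.Str.len ring ∧ PySem.Str.isIn t (ring ++ ring) = true)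
    ↔ (0 < t.toList.length ∧ t.toList.length ≤ ring.toList.length ∧ t.toList <:+: (ring.toList ++ ring.toList)) := by
  rw [PySem.Str.isIn_iff_infix]
  simp [String.toList_append]

-- the two folds agree ring by ring
lemma fold_eq (t : String) (rs : List String) (acc : Int) :
    rs.foldl (fun answer ring =>
      if solLoop t.toList ring.toList (PySem.List.pyRange 0 ((ring.toList.length : Int)) 1)
      then answer + 1 else answer) acc
    = rs.foldl (fun a ring =>
      a + (if 0 < PySem.Str.len t ∧ PySem.Str.len t ≤ PySem.Str.len ring ∧ PySem.Str.isIn t (ring ++ ring) = true then 1 else 0)) acc := by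
  induction rs generalizing acc with
  | nil => rfl
  | cons r rs ih =>
      simp only [List.foldl_cons]
      rw [← ih]
      congr 1
      by_cases hb : solLoop t.toList r.toList (PySem.List.pyRange 0 ((r.toList.length : Int)) 1) = true
      · rw [if_pos hb, if_pos ((cond_iff t r).mpr ((ring_iff t.toList r.toList).mp hb))]
      · rw [if_neg hb, if_neg (fun hc => hb ((ring_iff t.toList r.toList).mpr ((cond_iff t r).mp hc))), add_zero]

-- ===== VERDICT (by name: the statement is the Claim_ definition above) =====
theorem solution_spec : Claim_equal_solution := by
  intro t N rings _
  unfold Spec_solution solution solution_alt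
  exact fold_eq t rings 0
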